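-- pv_equiv track=rewrite | github.com/0neiszer0/book_member_maker | testing/algorithm.py | select_diverse_solutions
-- ===== SOURCE A (Python) =====
-- def hamming_distance(ind1, ind2):
--     """두 조합(individual)이 얼마나 다른지 계산 (해밍 거리)"""
--     return sum(c1 != c2 for c1, c2 in zip(ind1, ind2))
--
-- def select_diverse_solutions(sorted_solutions, num_to_select, min_distance):
--     if not sorted_solutions:
--         return []
--
--     diverse_selection = [sorted_solutions[0]]  # 점수 1등은 무조건 포함
--
--     for sol in sorted_solutions[1:]:
--         if len(diverse_selection) >= num_to_select:
--             break
--
--         # 현재 후보(sol)가 이미 선택된 조합들과 얼마나 다른지 최소 거리를 계산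
--         min_dist_to_selection = min(hamming_distance(sol, selected_sol) for selected_sol in diverse_selection)
--
--         # 최소 거리 기준을 통과하면 최종 후보에 추가
--         if min_dist_to_selection >= min_distance:
--             diverse_selection.append(sol)
--
--     return diverse_selection
-- ===== SOURCE B (Python) =====
-- def hamming_distance(ind1, ind2):
--     return sum(c1 != c2 for c1, c2 in zip(ind1, ind2))
--
-- def _diverse_chain(candidates, min_distance):
--     """Sieve: repeatedly keep the best remaining candidate and discard from the
--     pool everything too close to it; no scan over the selection is ever needed,
--     since surviving the successive filters == being far from every kept one."""
--     chain = []
--     pending = candidates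
--     while pending:
--         head = pending[0]
--         chain.append(head)
--         pending = [c for c in pending[1:] if hamming_distance(c, head) >= min_distance]
--     return chain
--
-- def select_diverse_solutions(sorted_solutions, num_to_select, min_distance):
--     # the top scorer is always kept, hence at least one result: slice to max(1, n)
--     chain = _diverse_chain(sorted_solutions, min_distance)
--     return chain[:max(1, num_to_select)]
-- ===== Notes on version B (the rewrite author's own statement) =====
-- stated objective: alternative
-- what changed: Replaces the greedy loop that re-scans the whole selection per candidate with a two-stage sieve: repeatedly keep the first remaining candidate and filter the pending pool against only that newest pick, then slice the resulting chain to max(1, num_to_select).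
import Mathlib
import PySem

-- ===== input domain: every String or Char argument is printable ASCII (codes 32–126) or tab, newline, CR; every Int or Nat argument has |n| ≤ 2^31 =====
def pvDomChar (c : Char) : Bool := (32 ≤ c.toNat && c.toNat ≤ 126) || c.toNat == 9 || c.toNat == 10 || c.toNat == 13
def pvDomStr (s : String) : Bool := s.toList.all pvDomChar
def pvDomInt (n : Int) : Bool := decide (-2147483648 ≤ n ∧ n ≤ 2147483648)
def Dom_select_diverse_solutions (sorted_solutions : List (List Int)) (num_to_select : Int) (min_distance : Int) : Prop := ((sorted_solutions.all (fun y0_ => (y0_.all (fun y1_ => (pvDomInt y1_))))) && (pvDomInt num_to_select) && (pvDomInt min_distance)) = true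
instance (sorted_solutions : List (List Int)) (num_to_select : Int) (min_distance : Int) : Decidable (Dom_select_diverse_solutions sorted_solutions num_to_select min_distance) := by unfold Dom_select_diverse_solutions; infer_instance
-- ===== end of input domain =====

-- B builds the full diverse chain by sieve-style pool filtering (no scan over the selection), then slices it; objective: alternative.


-- ===== PORT A =====
-- sum(c1 != c2 for c1, c2 in zip(ind1, ind2))
def hamming_distance (ind1 ind2 : List Int) : Int :=
  (ind1.zip ind2).foldl (fun acc p => acc + (if p.1 ≠ p.2 then 1 else 0)) 0

-- A's loop: for sol in rest, break once quota reached (once the quota holds the state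
-- no longer changes, so the break is the absorbing guard of the fold); the min over the
-- (always nonempty) selection is ported with min?.getD 0.
def select_diverse_solutions (sorted_solutions : List (List Int)) (num_to_select : Int) (min_distance : Int) : List (List Int) :=
  match sorted_solutions with
  | [] => []
  | first :: rest =>
    rest.foldl (fun sel sol =>
      if (sel.length : Int) ≥ num_to_select then sel
      else if ((sel.map (fun s => hamming_distance sol s)).min?.getD 0) ≥ min_distance then
        sel ++ [sol]
      else sel) [first]

-- ===== PORT B =====
-- B's hamming_distance (same module helper, transliterated for B's port)
def hammingB (ind1 ind2 : List Int) : Int :=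
  (ind1.zip ind2).foldl (fun acc p => acc + (if p.1 ≠ p.2 then 1 else 0)) 0

-- _diverse_chain: while pending: keep head, filter pool against head only
def diverse_chain (min_distance : Int) (pending : List (List Int)) : List (List Int) :=
  match pending with
  | [] => []
  | head :: t => head :: diverse_chain min_distance (t.filter (fun c => decide (hammingB c head ≥ min_distance)))
termination_by pending.length
decreasing_by simpa using Nat.lt_succ_of_le (Nat.le_trans (List.length_filter_le _ _) (by simp))

-- chain[:max(1, num_to_select)] — the bound is ≥ 1, so the slice is a take
def select_diverse_solutions_alt (sorted_solutions : List (List Int)) (num_to_select : Int) (min_distance : Int) : List (List Int) :=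
  (diverse_chain min_distance sorted_solutions).take (max 1 num_to_select).toNat

-- ===== PRECONDITION & SPEC =====
def Spec_select_diverse_solutions (sorted_solutions : List (List Int)) (num_to_select : Int) (min_distance : Int) (out : List (List Int)) : Prop := out = select_diverse_solutions_alt sorted_solutions num_to_select min_distance
instance (sorted_solutions : List (List Int)) (num_to_select : Int) (min_distance : Int) (out : List (List Int)) : Decidable (Spec_select_diverse_solutions sorted_solutions num_to_select min_distance out) := by unfold Spec_select_diverse_solutions; infer_instance

-- ===== CLAIM (what is proved, stated in full; the proofs are below) =====
def Claim_equal_select_diverse_solutions : Prop := ∀ (sorted_solutions : List (List Int)) (num_to_select : Int) (min_distance : Int), Dom_select_diverse_solutions sorted_solutions num_to_select min_distance → Spec_select_diverse_solutions sorted_solutions num_to_select min_distance (select_diverse_solutions sorted_solutions num_to_select min_distance)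

-- ===== LEMMAS AND PROOFS =====

theorem diverse_chain_nil (m : Int) : diverse_chain m [] = [] := by
  rw [diverse_chain.eq_def]

theorem diverse_chain_cons (m : Int) (h : List Int) (t : List (List Int)) :
    diverse_chain m (h :: t) = h :: diverse_chain m (t.filter (fun c => decide (hammingB c h ≥ m))) := by
  rw [diverse_chain.eq_def]

-- proof-only helper: "sol is far from every element of sel"
def far_enough (sol : List Int) (selection : List (List Int)) (min_distance : Int) : Bool :=
  match selection with
  | [] => true
  | selected :: more =>
    if hamming_distance sol selected < min_distance then false
    else far_enough sol more min_distance

theorem hammingB_eq (a b : List Int) : hammingB a b = hamming_distance a b := rfl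

-- once the quota is reached, A's fold no longer changes the state
theorem foldl_absorb (num_to_select min_distance : Int) (rest : List (List Int))
    (sel : List (List Int)) (h : (sel.length : Int) ≥ num_to_select) :
    rest.foldl (fun sel sol =>
      if (sel.length : Int) ≥ num_to_select then sel
      else if ((sel.map (fun s => hamming_distance sol s)).min?.getD 0) ≥ min_distance then
        sel ++ [sol]
      else sel) sel = sel := by
  induction rest with
  | nil => rfl
  | cons sol more ih => simp [List.foldl_cons, if_pos h, ih]

-- on a nonempty selection, A's "min distance ≥ m" test equals the all-far predicate
theorem min_test_eq_far (sol : List Int) (sel : List (List Int)) (m : Int) (hne : sel ≠ []) :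
    (((sel.map (fun s => hamming_distance sol s)).min?.getD 0) ≥ m) ↔ far_enough sol sel m = true := by
  induction sel with
  | nil => exact absurd rfl hne
  | cons s t ih =>
    by_cases ht : t = []
    · subst ht
      simp [far_enough, List.min?, not_lt]
    · have ihx := ih ht
      obtain ⟨x, xs, rfl⟩ := List.exists_cons_of_ne_nil ht
      simp only [List.map_cons, List.min?_cons, far_enough] at *
      simp only [Option.getD_some] at *
      constructor
      · intro h
        have h1 : hamming_distance sol s ≥ m := le_trans (le_trans h (min_le_left _ _)) (le_refl _)
        have h2 : ((List.min? (hamming_distance sol x :: List.map (fun s => hamming_distance sol s) xs)).getD 0) ≥ m := by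
          rw [List.min?_cons]
          simp only [Option.getD_some]
          exact le_trans h (min_le_right _ _)
        rw [if_neg (by omega : ¬ hamming_distance sol s < m)]
        exact ihx.mp (by simpa [List.min?_cons] using h2)
      · intro h
        by_cases hc : hamming_distance sol s < m
        · rw [if_pos hc] at h; exact absurd h (by simp)
        · rw [if_neg hc] at h
          exact le_min (by omega) (ihx.mpr h)

-- being far from sel ++ [sol] splits into far from sel and far from sol
theorem far_append (c : List Int) (a b : List (List Int)) (m : Int) :
    far_enough c (a ++ b) m = (far_enough c a m && far_enough c b m) := by
  induction a with
  | nil => simp [far_enough]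
  | cons s t ih => by_cases h : hamming_distance c s < m <;> simp [far_enough, h, ih]

theorem far_singleton (c sol : List Int) (m : Int) :
    far_enough c [sol] m = decide (hammingB c sol ≥ m) := by
  by_cases h : hamming_distance c sol < m
  · simp [far_enough, h, hammingB_eq]
  · simp [far_enough, h, hammingB_eq]; omega

-- main invariant: A's fold from a nonempty state equals the sieve chain, truncated
theorem loop_eq (n m : Int) (rest : List (List Int)) :
    ∀ sel : List (List Int), sel ≠ [] →
    rest.foldl (fun sel sol =>
      if (sel.length : Int) ≥ n then sel
      else if ((sel.map (fun s => hamming_distance sol s)).min?.getD 0) ≥ m then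
        sel ++ [sol]
      else sel) sel
      = sel ++ (diverse_chain m (rest.filter (fun c => far_enough c sel m))).take (n - sel.length).toNat := by
  induction rest with
  | nil => intro sel _; simp [diverse_chain_nil]
  | cons sol more ih =>
    intro sel hne
    by_cases hq : (sel.length : Int) ≥ n
    · have h0 : (n - (sel.length : Int)).toNat = 0 := by omega
      simp only [List.foldl_cons, if_pos hq, foldl_absorb n m more sel hq, h0,
        List.take_zero, List.append_nil]
    · simp only [List.foldl_cons, if_neg hq]
      by_cases hf : far_enough sol sel m = true
      · rw [if_pos ((min_test_eq_far sol sel m hne).mpr hf)]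
        rw [ih (sel ++ [sol]) (by simp)]
        have hfilt : more.filter (fun c => far_enough c (sel ++ [sol]) m)
            = (more.filter (fun c => far_enough c sel m)).filter
                (fun c => decide (hammingB c sol ≥ m)) := by
          rw [List.filter_filter]
          apply List.filter_congr
          intro c _
          rw [far_append, far_singleton, Bool.and_comm]
        have hcons : (sol :: more).filter (fun c => far_enough c sel m)
            = sol :: more.filter (fun c => far_enough c sel m) := by
          simp [hf]
        rw [hcons, diverse_chain_cons]
        have hlen : ((sel ++ [sol]).length : Int) = (sel.length : Int) + 1 := by
          simp
        have htn : (n - (sel.length : Int)).toNat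
            = (n - ((sel ++ [sol]).length : Int)).toNat + 1 := by
          rw [hlen]; omega
        rw [htn, List.take_succ_cons, hfilt]
        simp
      · rw [if_neg (fun h => hf ((min_test_eq_far sol sel m hne).mp h))]
        rw [ih sel hne]
        have hcons : (sol :: more).filter (fun c => far_enough c sel m)
            = more.filter (fun c => far_enough c sel m) := by
          simp [hf]
        rw [hcons]

-- ===== VERDICT (by name: the statement is the Claim_ definition above) =====
theorem select_diverse_solutions_spec : Claim_equal_select_diverse_solutions := by
  intro sorted_solutions num_to_select min_distance _
  unfold Spec_select_diverse_solutions
  cases sorted_solutions with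
  | nil => simp [select_diverse_solutions, select_diverse_solutions_alt, diverse_chain_nil]
  | cons first rest =>
    simp only [select_diverse_solutions, select_diverse_solutions_alt]
    rw [loop_eq num_to_select min_distance rest [first] (by simp)]
    have hfilt : rest.filter (fun c => far_enough c [first] min_distance)
        = rest.filter (fun c => decide (hammingB c first ≥ min_distance)) := by
      apply List.filter_congr
      intro c _
      exact far_singleton c first min_distance
    rw [diverse_chain_cons]
    have htn : (max 1 num_to_select).toNat = (num_to_select - ((1:Nat) : Int)).toNat + 1 := by
      omega
    rw [htn, List.take_succ_cons, hfilt]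
    simp
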